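-- pv_equiv track=rewrite | github.com/mgagvani/TJHSST_AI | Unit1b/Sliding Puzzles/1 Gagvani Manav slidepuzzleastar.py | taxicab_new
-- ===== SOURCE A (Python) =====
-- def to_mat2(s, n):
--     return list(map(list, zip(*[map(str, s)] * n)))
--
-- def taxicab_new(current, goal_positions, size):
--     currmat = to_mat2(current, size)
--     total = 0
--
--     for (i, row) in enumerate(currmat):
--         for (j, val) in enumerate(row):
--             if val == ".":
--                 continue # SKIP THE DOT
--             goali, goalj = goal_positions[val]
--             dy, dx = abs(goali - i), abs(goalj - j)
--             total += (dy + dx)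
--     return total
-- ===== SOURCE B (Python) =====
-- def taxicab_new(current, goal_positions, size):
--     # Single flat pass over the sequence (no matrix is built); trailing
--     # elements beyond the last full row are skipped, as in the matrix build.
--     if size <= 0:
--         return 0
--     total = 0
--     for idx in range(len(current) // size * size):
--         i, j = divmod(idx, size)
--         val = str(current[idx])
--         if val == ".":
--             continue
--         goali, goalj = goal_positions[val]
--         total += abs(goali - i) + abs(goalj - j)
--     return total
-- ===== Notes on version B (the rewrite author's own statement) =====
-- stated objective: simpler
-- what changed: Drops the matrix construction (zip-based to_mat2) and the nested enumerate loops; one flat pass over the truncated prefix computes row/column by divmod on the index.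
import Mathlib
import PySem

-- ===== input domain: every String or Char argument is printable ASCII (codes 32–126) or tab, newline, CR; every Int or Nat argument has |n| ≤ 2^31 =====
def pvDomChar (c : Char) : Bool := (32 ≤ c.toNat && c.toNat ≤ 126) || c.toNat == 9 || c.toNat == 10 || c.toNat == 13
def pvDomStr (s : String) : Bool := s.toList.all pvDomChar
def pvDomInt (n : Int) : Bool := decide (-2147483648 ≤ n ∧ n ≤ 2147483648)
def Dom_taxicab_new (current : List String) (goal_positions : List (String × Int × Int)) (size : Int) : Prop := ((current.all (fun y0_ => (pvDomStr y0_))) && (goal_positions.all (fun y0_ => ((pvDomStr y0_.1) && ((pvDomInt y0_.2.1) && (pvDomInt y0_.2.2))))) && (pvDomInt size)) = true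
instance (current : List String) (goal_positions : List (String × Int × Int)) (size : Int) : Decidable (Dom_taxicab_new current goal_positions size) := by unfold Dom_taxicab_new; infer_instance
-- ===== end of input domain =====

-- B replaces A's matrix build (to_mat2) + nested enumerate loops by one flat pass with divmod;
-- equivalence is about the return value (neither version mutates its arguments).

-- ===== PORT A =====
-- zip(*[iter]*n) groups consecutive n-blocks, dropping the incomplete tail
def pvChunk (l : List String) (n : Nat) : List (List String) :=
  if _h : 0 < n ∧ n ≤ l.length then (l.take n) :: pvChunk (l.drop n) n else []
termination_by l.length
decreasing_by simp; omega

-- to_mat2(s, n): map(str, s) is the identity on a list of strings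
def to_mat2 (s : List String) (n : Int) : List (List String) :=
  if 0 < n then pvChunk (s.map (fun v => v)) n.toNat else []

def taxicab_new (current : List String) (goal_positions : List (String × Int × Int)) (size : Int) : Int :=
  let currmat := to_mat2 current size
  (PySem.List.enumerate currmat 0).foldl (fun total p =>
    (PySem.List.enumerate p.2 0).foldl (fun total q =>
      if q.2 == "." then total  -- SKIP THE DOT
      else
        -- goal_positions arrives as dict(goal_positions); getD is safe: Pre_ guarantees the key
        let g := (PySem.Dict.ofList goal_positions).getD q.2 (0, 0)
        total + (|g.1 - p.1| + |g.2 - q.1|)) total) 0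

-- ===== PORT B =====
def taxicab_new_alt (current : List String) (goal_positions : List (String × Int × Int)) (size : Int) : Int :=
  if size ≤ 0 then 0
  else
    (PySem.List.pyRange 0 (PySem.Int.floordiv (current.length : Int) size * size) 1).foldl
      (fun total idx =>
        let i := PySem.Int.floordiv idx size
        let j := PySem.Int.mod idx size
        let val := PySem.List.pyGetD current idx ""   -- idx is always in range here
        if val == "." then total
        else
          let g := (PySem.Dict.ofList goal_positions).getD val (0, 0)
          total + |g.1 - i| + |g.2 - j|) 0

-- ===== PRECONDITION & SPEC =====
-- Pre_ excludes exactly the KeyError inputs: some non-"." tile inside the scanned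
-- (truncated) prefix has no entry in goal_positions, where Python A raises.
def Pre_taxicab_new (current : List String) (goal_positions : List (String × Int × Int)) (size : Int) : Prop :=
  ∀ x ∈ current.take ((current.length / size.toNat) * size.toNat),
    x = "." ∨ (PySem.Dict.ofList goal_positions).contains x = true
instance (current : List String) (goal_positions : List (String × Int × Int)) (size : Int) : Decidable (Pre_taxicab_new current goal_positions size) := by unfold Pre_taxicab_new; infer_instance

def pvWitness_taxicab_new : List String × (List (String × Int × Int)) × Int :=
  (["2", ".", "1", "0"], [("1", (0, 0)), ("2", (1, 0)), ("0", (1, 1))], 2)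

def Spec_taxicab_new (current : List String) (goal_positions : List (String × Int × Int)) (size : Int) (out : Int) : Prop := out = taxicab_new_alt current goal_positions size
instance (current : List String) (goal_positions : List (String × Int × Int)) (size : Int) (out : Int) : Decidable (Spec_taxicab_new current goal_positions size out) := by unfold Spec_taxicab_new; infer_instance

-- ===== CLAIM (what is proved, stated in full; the proofs are below) =====
def Claim_equal_taxicab_new : Prop := ∀ (current : List String) (goal_positions : List (String × Int × Int)) (size : Int), Dom_taxicab_new current goal_positions size → Pre_taxicab_new current goal_positions size → Spec_taxicab_new current goal_positions size (taxicab_new current goal_positions size)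

-- ===== LEMMAS AND PROOFS =====

-- the contribution of one tile v sitting at (i, j)
def contrib (gp : List (String × Int × Int)) (i j : Int) (v : String) : Int :=
  if v == "." then 0
  else
    let g := (PySem.Dict.ofList gp).getD v (0, 0)
    |g.1 - i| + |g.2 - j|

-- A's inner loop as a recursive row sum starting at column j
def rowSumAux (gp : List (String × Int × Int)) (i : Int) (row : List String) (j : Int) : Int :=
  match row with
  | [] => 0
  | v :: vs => contrib gp i j v + rowSumAux gp i vs (j + 1)

-- A's outer loop as a recursive matrix sum starting at row i
def matSum (gp : List (String × Int × Int)) (rows : List (List String)) (i : Int) : Int :=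
  match rows with
  | [] => 0
  | r :: rs => rowSumAux gp i r 0 + matSum gp rs (i + 1)

lemma inner_fold (gp : List (String × Int × Int)) (i : Int) (row : List String) :
    ∀ (j acc : Int),
      (PySem.List.enumerate row j).foldl (fun total q =>
        if q.2 == "." then total
        else
          let g := (PySem.Dict.ofList gp).getD q.2 (0, 0)
          total + (|g.1 - i| + |g.2 - q.1|)) acc
      = acc + rowSumAux gp i row j := by
  induction row with
  | nil => intro j acc; simp [PySem.List.enumerate_nil, rowSumAux]
  | cons v vs ih =>
    intro j acc
    rw [PySem.List.enumerate_cons, List.foldl_cons, ih, rowSumAux, contrib]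
    split
    · simp
    · ring

lemma outer_fold (gp : List (String × Int × Int)) (rows : List (List String)) :
    ∀ (i acc : Int),
      (PySem.List.enumerate rows i).foldl (fun total p =>
        (PySem.List.enumerate p.2 0).foldl (fun total q =>
          if q.2 == "." then total
          else
            let g := (PySem.Dict.ofList gp).getD q.2 (0, 0)
            total + (|g.1 - p.1| + |g.2 - q.1|)) total) acc
      = acc + matSum gp rows i := by
  induction rows with
  | nil => intro i acc; simp [PySem.List.enumerate_nil, matSum]
  | cons r rs ih =>
    intro i acc
    rw [PySem.List.enumerate_cons, List.foldl_cons, inner_fold, ih, matSum]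
    ring

lemma A_as_matSum (current : List String) (gp : List (String × Int × Int)) (size : Int) :
    taxicab_new current gp size = matSum gp (to_mat2 current size) 0 := by
  unfold taxicab_new
  rw [outer_fold]
  ring

-- the flat block sum over the indices of the truncated prefix of l, with row offset i0
def blockSum (gp : List (String × Int × Int)) (n : Nat) (l : List String) (i0 : Nat) : Int :=
  ((List.range ((l.length / n) * n)).map
    (fun (k : Nat) => contrib gp ((i0 : Int) + ((k / n : Nat) : Int)) ((k % n : Nat) : Int) (l.getD k ""))).sum

lemma rowSumAux_as_sum (gp : List (String × Int × Int)) (i : Int) (row : List String) :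
    ∀ (j : Int),
      rowSumAux gp i row j
      = ((List.range row.length).map (fun (t : Nat) => contrib gp i (j + (t : Int)) (row.getD t ""))).sum := by
  induction row with
  | nil => intro j; simp [rowSumAux]
  | cons v vs ih =>
    intro j
    rw [rowSumAux, ih (j + 1), List.length_cons, List.range_succ_eq_map, List.map_cons,
        List.sum_cons, List.map_map]
    simp only [Nat.cast_zero, add_zero, List.getD_cons_zero]
    congr 1
    refine congrArg List.sum (List.map_congr_left ?_)
    intro t _
    simp only [Function.comp_apply, List.getD_cons_succ]
    congr 1
    push_cast
    ring

lemma chunk_blockSum (gp : List (String × Int × Int)) (n : Nat) (hn : 0 < n) :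
    ∀ (N : Nat) (l : List String), l.length ≤ N → ∀ (i0 : Nat),
      matSum gp (pvChunk l n) (i0 : Int) = blockSum gp n l i0 := by
  intro N
  induction N with
  | zero =>
    intro l hl i0
    have : l = [] := List.eq_nil_of_length_eq_zero (Nat.le_zero.mp hl)
    subst this
    rw [pvChunk, dif_neg (by omega)]
    simp [matSum, blockSum]
  | succ N ih =>
    intro l hl i0
    by_cases hlen : n ≤ l.length
    · -- one full row is split off
      rw [pvChunk, dif_pos ⟨hn, hlen⟩, matSum]
      have hcast : ((i0 : Int)) + 1 = ((i0 + 1 : Nat) : Int) := by push_cast; ring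
      rw [hcast, ih (l.drop n) (by simp [List.length_drop]; omega) (i0 + 1)]
      -- split the flat sum into the first row and the rest
      have hM : (l.length / n) * n = n + ((l.drop n).length / n) * n := by
        have h1 : l.length / n = (l.length - n) / n + 1 := by
          conv_lhs => rw [show l.length = (l.length - n) + n from by omega]
          rw [Nat.add_div_right _ hn]
        rw [List.length_drop, h1]
        ring
      unfold blockSum
      rw [hM, List.range_add, List.map_append, List.sum_append, List.map_map]
      congr 1
      · -- first row
        rw [rowSumAux_as_sum, List.length_take, Nat.min_eq_left hlen]
        refine congrArg List.sum (List.map_congr_left ?_)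
        intro t ht
        have ht' : t < n := List.mem_range.mp ht
        have h1 : t / n = 0 := Nat.div_eq_of_lt ht'
        have h2 : t % n = t := Nat.mod_eq_of_lt ht'
        have h3 : (l.take n).getD t "" = l.getD t "" := by
          simp [List.getD, ht']
        rw [h1, h2, h3]
        simp
      · -- remaining rows, shifted by one block
        refine congrArg List.sum (List.map_congr_left ?_)
        intro t _
        simp only [Function.comp_apply]
        have h1 : (n + t) / n = t / n + 1 := by
          rw [Nat.add_comm, Nat.add_div_right _ hn]
        have h2 : (n + t) % n = t % n := Nat.add_mod_left n t
        have h3 : l.getD (n + t) "" = (l.drop n).getD t "" := by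
          simp [List.getD, List.getElem?_drop]
        rw [h1, h2, h3]
        congr 1
        push_cast
        ring
    · -- fewer than n elements remain: everything is dropped
      rw [pvChunk, dif_neg (by omega), matSum]
      unfold blockSum
      rw [Nat.div_eq_of_lt (by omega), Nat.zero_mul]
      simp

lemma B_as_blockSum (current : List String) (gp : List (String × Int × Int)) (size : Int)
    (hsz : 0 < size) :
    taxicab_new_alt current gp size = blockSum gp size.toNat current 0 := by
  unfold taxicab_new_alt
  rw [if_neg (by omega)]
  have hfun : (fun (total : Int) (idx : Int) =>
        let i := PySem.Int.floordiv idx size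
        let j := PySem.Int.mod idx size
        let val := PySem.List.pyGetD current idx ""
        if val == "." then total
        else
          let g := (PySem.Dict.ofList gp).getD val (0, 0)
          total + |g.1 - i| + |g.2 - j|)
      = (fun (total : Int) (idx : Int) =>
          total + contrib gp (PySem.Int.floordiv idx size) (PySem.Int.mod idx size)
            (PySem.List.pyGetD current idx "")) := by
    funext total idx
    simp only [contrib]
    split
    · simp
    · ring
  rw [hfun, PySem.List.foldl_add, zero_add]
  have hsize : size = ((size.toNat : Nat) : Int) := (Int.toNat_of_nonneg (le_of_lt hsz)).symm
  rw [hsize]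
  rw [show ((current.length : Int)) = ((current.length : Nat) : Int) from rfl,
      PySem.Int.floordiv_natCast, ← Nat.cast_mul, PySem.List.pyRange_zero_nat, List.map_map]
  unfold blockSum
  apply congrArg
  apply List.map_congr_left
  intro k _
  simp only [Function.comp_apply, PySem.Int.floordiv_natCast, PySem.Int.mod_natCast,
    PySem.List.pyGetD_natCast, Nat.cast_zero, zero_add]
  rfl

-- ===== VERDICT (by name: the statement is the Claim_ definition above) =====
theorem taxicab_new_spec : Claim_equal_taxicab_new := by
  intro current gp size _ _
  unfold Spec_taxicab_new
  rw [A_as_matSum]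
  by_cases hsz : 0 < size
  · rw [B_as_blockSum current gp size hsz]
    unfold to_mat2
    rw [if_pos hsz, List.map_id']
    have := chunk_blockSum gp size.toNat (by omega) current.length current (le_refl _) 0
    simpa using this
  · unfold to_mat2 taxicab_new_alt
    rw [if_neg hsz, if_pos (by omega)]
    simp [matSum]
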